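-- pv_equiv track=rewrite | github.com/pypi-data/pypi-mirror-403 | packages/vision_oslo_extension/vision_oslo_extension-3.13.1-py3-none-any.whl/vision_oslo_extension/cif_output_analysis.py | process_errors
-- ===== SOURCE A (Python) =====
-- from collections import defaultdict
--
-- def process_errors(error_list):
--     grouped_data = defaultdict(list)
--     for entry in error_list:
--         key = tuple(entry[1:])  # Last elements as tuple
--         train_id = entry[0]     # trainID
--         if train_id not in grouped_data[key]:  # Check if train_id is already added
--             grouped_data[key].append(train_id)
--     return [[*key, *train_ids] for key, train_ids in grouped_data.items()]
-- ===== SOURCE B (Python) =====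
-- def process_errors(error_list):
--     # Two staged comprehensions instead of an incremental grouping dict:
--     # first the distinct keys in first-occurrence order, then for each key a
--     # filtered scan of the whole list, deduplicated preserving order.
--     keys = list(dict.fromkeys(tuple(e[1:]) for e in error_list))
--     return [
--         [*key, *dict.fromkeys(e[0] for e in error_list if tuple(e[1:]) == key)]
--         for key in keys
--     ]
-- ===== Notes on version B (the rewrite author's own statement) =====
-- stated objective: alternative
-- what changed: A builds a defaultdict incrementally with an inline membership-scan dedup per entry; B uses no dict accumulator at all: it first lists the distinct keys in first-occurrence order, then for each key rescans the whole list, filtering and deduplicating that key's train ids in order.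
import Mathlib
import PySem

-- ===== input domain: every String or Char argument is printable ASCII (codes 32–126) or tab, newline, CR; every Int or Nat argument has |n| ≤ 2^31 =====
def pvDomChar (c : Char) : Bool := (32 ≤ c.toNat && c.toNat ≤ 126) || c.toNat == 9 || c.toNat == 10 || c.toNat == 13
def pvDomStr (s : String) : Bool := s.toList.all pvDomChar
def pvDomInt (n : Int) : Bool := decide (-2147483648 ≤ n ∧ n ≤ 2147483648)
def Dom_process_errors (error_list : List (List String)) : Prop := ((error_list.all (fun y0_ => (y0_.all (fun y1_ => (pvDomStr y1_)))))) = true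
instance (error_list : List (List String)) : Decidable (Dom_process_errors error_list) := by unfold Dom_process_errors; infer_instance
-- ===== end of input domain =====

-- B drops A's incremental grouping dict: it lists the distinct keys first, then for
-- each key filters and order-dedups that key's train ids from the whole list (alternative decomposition).

-- ===== PORT A =====
def process_errors (error_list : List (List String)) : List (List String) :=
  let grouped := error_list.foldl (fun d entry =>
      let key := PySem.List.slice entry (some 1) none
      let train_id := PySem.List.pyGetD entry 0 ""
      let v := d.getD key []
      d.insert key (if v.contains train_id then v else v ++ [train_id]))
    PySem.Dict.empty
  grouped.items.map (fun p => p.1 ++ p.2)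

-- ===== PORT B =====
def process_errors_alt (error_list : List (List String)) : List (List String) :=
  let keys := PySem.List.dedup (error_list.map (fun e => PySem.List.slice e (some 1) none))
  keys.map (fun key =>
    key ++ PySem.List.dedup
      ((error_list.filter (fun e => PySem.List.slice e (some 1) none == key)).map
        (fun e => PySem.List.pyGetD e 0 "")))

-- ===== PRECONDITION & SPEC =====
-- Pre_ excludes inputs containing an empty entry: entry[0] raises IndexError there (in A and in B alike).
def Pre_process_errors (error_list : List (List String)) : Prop :=
  ∀ entry ∈ error_list, entry ≠ []
instance (error_list : List (List String)) : Decidable (Pre_process_errors error_list) := by unfold Pre_process_errors; infer_instance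
def pvWitness_process_errors : List (List String) := [["x", "k"], ["y", "k"], ["x", "k"], ["x"]]

def Spec_process_errors (error_list : List (List String)) (out : List (List String)) : Prop := out = process_errors_alt error_list
instance (error_list : List (List String)) (out : List (List String)) : Decidable (Spec_process_errors error_list out) := by unfold Spec_process_errors; infer_instance

-- ===== CLAIM (what is proved, stated in full; the proofs are below) =====
def Claim_equal_process_errors : Prop := ∀ (error_list : List (List String)), Dom_process_errors error_list → Pre_process_errors error_list → Spec_process_errors error_list (process_errors error_list)

-- ===== LEMMAS AND PROOFS =====

-- abbreviations for A's loop pieces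
def pvKey (e : List String) : List String := PySem.List.slice e (some 1) none
def pvId (e : List String) : String := PySem.List.pyGetD e 0 ""

-- A's stored list at key k after folding l from dict d: d's value updated by the
-- ids of l's entries with key k (PySem.Set.update = append new elements in order).
theorem pvGetD_fold (l : List (List String)) :
    ∀ (d : PySem.Dict (List String) (List String)) (k : List String),
    (l.foldl (fun d e => d.insert (pvKey e) (PySem.Set.add (d.getD (pvKey e) []) (pvId e))) d).getD k []
      = PySem.Set.update (d.getD k []) ((l.filter (fun e => pvKey e == k)).map pvId) := by
  induction l with
  | nil => intro d k; rfl
  | cons e rest ih =>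
    intro d k
    simp only [List.foldl_cons, List.filter_cons]
    by_cases hk : pvKey e = k
    · subst hk
      simp only [beq_self_eq_true, if_pos, List.map_cons, PySem.Set.update_cons, ih,
        PySem.Dict.getD_insert_self]
    · have hne : (pvKey e == k) = false := beq_eq_false_iff_ne.2 hk
      simp only [hne, Bool.false_eq_true, if_false, ih,
        PySem.Dict.getD_insert, if_neg (Ne.symm hk)]

-- ===== VERDICT (by name: the statement is the Claim_ definition above) =====
theorem process_errors_spec : Claim_equal_process_errors := by
  intro error_list _ _
  unfold Spec_process_errors process_errors process_errors_alt
  show (error_list.foldl (fun d e => d.insert (pvKey e) (PySem.Set.add (d.getD (pvKey e) []) (pvId e))) PySem.Dict.empty).items.map (fun p => p.1 ++ p.2) = _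
  set step := fun (d : PySem.Dict (List String) (List String)) (e : List String) =>
      d.insert (pvKey e) (PySem.Set.add (d.getD (pvKey e) []) (pvId e)) with hstep
  set d := error_list.foldl step PySem.Dict.empty with hd
  have hnd : d.keys.Nodup := by
    rw [hd, hstep]
    exact PySem.Dict.nodup_keys_foldl_insert_key error_list pvKey _ _ PySem.Dict.nodup_keys_empty
  have hkeys : d.keys = PySem.List.dedup (error_list.map pvKey) := by
    rw [hd, hstep, PySem.Dict.keys_foldl_insert_key, PySem.Dict.keys_empty,
      PySem.Set.update_nil_left, PySem.List.dedup_eq_ofList]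
  rw [PySem.Dict.items_eq_map_keys d hnd [], List.map_map, hkeys]
  apply List.map_congr_left
  intro k _
  have hge : d.getD k [] = PySem.Set.update (PySem.Dict.empty.getD k [])
      ((error_list.filter (fun e => pvKey e == k)).map pvId) := by
    rw [hd]; exact pvGetD_fold error_list PySem.Dict.empty k
  simp only [Function.comp, hge, PySem.Dict.getD_empty, PySem.Set.update_nil_left,
    PySem.List.dedup_eq_ofList]
  rfl
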